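-- pv_equiv track=rewrite | github.com/JSONsw/MarketBoss | ai-trading-system/src/features/validation.py | missing_value_counts
-- ===== SOURCE A (Python) =====
-- from typing import List, Dict, Tuple
--
-- def missing_value_counts(features: List[Dict]) -> Dict[str, int]:
--     """Count None values per feature key."""
--     counts = {}
--     for f in features:
--         for k, v in f.items():
--             if v is None:
--                 counts[k] = counts.get(k, 0) + 1
--             else:
--                 counts.setdefault(k, 0)
--     return counts
-- ===== SOURCE B (Python) =====
-- def missing_value_counts(features):
--     """Count None values per feature key."""
--     items = [kv for f in features for kv in f.items()]
--     keys = list(dict.fromkeys(k for k, _ in items))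
--     return {k: sum(1 for kk, v in items if kk == k and v is None) for k in keys}
-- ===== Notes on version B (the rewrite author's own statement) =====
-- stated objective: alternative
-- what changed: Replaces A's single fused pass with a stateful dict (get/setdefault bookkeeping per item) by a three-step decomposition: flatten all items, collect the keys in first-occurrence order via dict.fromkeys, then count the None occurrences per key with a generator sum.
import Mathlib
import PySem

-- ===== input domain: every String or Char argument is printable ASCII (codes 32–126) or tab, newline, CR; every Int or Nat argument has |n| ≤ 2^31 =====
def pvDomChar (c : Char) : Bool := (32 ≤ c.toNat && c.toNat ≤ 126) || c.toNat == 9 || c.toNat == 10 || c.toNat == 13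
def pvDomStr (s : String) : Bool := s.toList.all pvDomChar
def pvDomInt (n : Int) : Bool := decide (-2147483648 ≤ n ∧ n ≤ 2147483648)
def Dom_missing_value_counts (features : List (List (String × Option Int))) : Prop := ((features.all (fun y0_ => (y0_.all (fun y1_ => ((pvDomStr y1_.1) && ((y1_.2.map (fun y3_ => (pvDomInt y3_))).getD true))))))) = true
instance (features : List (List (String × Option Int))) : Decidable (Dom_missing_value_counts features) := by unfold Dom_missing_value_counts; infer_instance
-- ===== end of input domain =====

-- B replaces A's single fused dict-building pass by a three-step decomposition
-- (flatten the items, collect keys in first-occurrence order, count Nones per key);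
-- objective: alternative (not faster).

-- ===== PORT A =====
def missing_value_counts (features : List (List (String × Option Int))) : List (String × Int) :=
  (features.foldl
    (fun (counts : PySem.Dict String Int) f =>
      f.foldl
        (fun counts kv =>
          match kv.2 with
          | none => counts.insert kv.1 (counts.getD kv.1 0 + 1)
          | some _ => counts.setdefault kv.1 0)
        counts)
    PySem.Dict.empty).items

-- ===== PORT B =====
def missing_value_counts_alt (features : List (List (String × Option Int))) : List (String × Int) :=
  let items := features.flatten
  let keys := PySem.List.dedup (items.map Prod.fst)
  keys.map (fun k => (k, (items.countP (fun kv => kv.1 == k && kv.2 == none) : Int)))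

-- ===== PRECONDITION & SPEC =====
def Spec_missing_value_counts (features : List (List (String × Option Int))) (out : List (String × Int)) : Prop := out = missing_value_counts_alt features
instance (features : List (List (String × Option Int))) (out : List (String × Int)) : Decidable (Spec_missing_value_counts features out) := by unfold Spec_missing_value_counts; infer_instance

-- ===== CLAIM (what is proved, stated in full; the proofs are below) =====
def Claim_equal_missing_value_counts : Prop := ∀ (features : List (List (String × Option Int))), Dom_missing_value_counts features → Spec_missing_value_counts features (missing_value_counts features)

-- ===== LEMMAS AND PROOFS =====

-- A's loop body, and its uniform insert form
def pvStep (d : PySem.Dict String Int) (kv : String × Option Int) : PySem.Dict String Int :=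
  match kv.2 with
  | none => d.insert kv.1 (d.getD kv.1 0 + 1)
  | some _ => d.setdefault kv.1 0

def pvVal (d : PySem.Dict String Int) (kv : String × Option Int) : Int :=
  if kv.2 == none then d.getD kv.1 0 + 1 else d.getD kv.1 0

def pvStepIns (d : PySem.Dict String Int) (kv : String × Option Int) : PySem.Dict String Int :=
  d.insert kv.1 (pvVal d kv)

def pvCnt (items : List (String × Option Int)) (k : String) : Int :=
  (items.countP (fun kv => kv.1 == k && kv.2 == none) : Int)

theorem pv_foldl_flatten {α β : Type} (L : List (List α)) (f : β → α → β) (i : β) :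
    L.foldl (fun a xs => xs.foldl f a) i = L.flatten.foldl f i := by
  induction L generalizing i with
  | nil => rfl
  | cons x xs ih => simp [List.flatten_cons, List.foldl_append, ih]

theorem pv_insert_self (d : PySem.Dict String Int) (k : String)
    (h : d.contains k = true) (hn : d.keys.Nodup) :
    d.insert k (d.getD k 0) = d := by
  apply PySem.Dict.ext
  rw [PySem.Dict.items_insert_of_contains _ _ h]
  conv_rhs => rw [← List.map_id d.items]
  apply List.map_congr_left
  intro p hp
  by_cases hpk : p.1 = k
  · have hmem : (k, p.2) ∈ d.items := by
      have : p = (p.1, p.2) := rfl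
      rw [hpk] at this; rw [← this]; exact hp
    have hval : d.getD k 0 = p.2 := by
      exact PySem.Dict.getD_of_mem_items d hmem hn 0
    simp only [hpk, hval, beq_self_eq_true, if_true, id_eq]
    exact congrArg (fun x => (x, p.2)) hpk.symm
  · simp [hpk]

theorem pv_step_eq (d : PySem.Dict String Int) (kv : String × Option Int)
    (hn : d.keys.Nodup) : pvStep d kv = pvStepIns d kv := by
  obtain ⟨k, v⟩ := kv
  cases v with
  | none => simp [pvStep, pvStepIns, pvVal]
  | some n =>
    simp only [pvStep, pvStepIns, pvVal]
    by_cases hc : d.contains k = true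
    · rw [PySem.Dict.setdefault_of_contains _ _ hc]
      rw [if_neg (by simp)]
      exact (pv_insert_self d k hc hn).symm
    · have hc' : d.contains k = false := by simpa using hc
      rw [PySem.Dict.setdefault_of_not_contains _ _ hc']
      have h0 : d.getD k 0 = (0 : Int) := by simp [PySem.Dict.getD_of_not_contains, hc']
      simp [h0]

theorem pv_nodup_step (d : PySem.Dict String Int) (kv : String × Option Int)
    (hn : d.keys.Nodup) : (pvStepIns d kv).keys.Nodup := by
  unfold pvStepIns
  exact PySem.Dict.nodup_keys_insert _ _ _ hn

theorem pv_foldl_eq (items : List (String × Option Int)) :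
    ∀ (d : PySem.Dict String Int), d.keys.Nodup →
      items.foldl pvStep d = items.foldl pvStepIns d := by
  induction items with
  | nil => intro d _; rfl
  | cons kv rest ih =>
    intro d hn
    simp only [List.foldl_cons]
    rw [pv_step_eq d kv hn]
    exact ih _ (pv_nodup_step d kv hn)

theorem pv_getD_foldl (items : List (String × Option Int)) :
    ∀ (d : PySem.Dict String Int) (j : String),
      (items.foldl pvStepIns d).getD j 0 = d.getD j 0 + pvCnt items j := by
  induction items with
  | nil => intro d j; simp [pvCnt]
  | cons kv rest ih =>
    intro d j
    have hcnt : pvCnt (kv :: rest) j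
        = pvCnt rest j + (if kv.1 == j && kv.2 == none then 1 else 0) := by
      simp only [pvCnt, List.countP_cons]
      push_cast
      rfl
    rw [List.foldl_cons, ih, hcnt]
    unfold pvStepIns pvVal
    rw [PySem.Dict.getD_insert]
    by_cases hj : j = kv.1
    · subst hj
      cases kv.2 <;> simp <;> try ring
    · have : (kv.1 == j) = false := by simp [Ne.symm hj]
      simp [hj, this]

theorem missing_value_counts_eq_foldl (features : List (List (String × Option Int))) :
    missing_value_counts features
      = ((features.flatten).foldl pvStepIns PySem.Dict.empty).items := by
  unfold missing_value_counts
  change ((features.foldl (fun d f => f.foldl pvStep d) PySem.Dict.empty)).items = _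
  rw [pv_foldl_flatten, pv_foldl_eq _ _ (by simp)]

-- ===== VERDICT (by name: the statement is the Claim_ definition above) =====
theorem missing_value_counts_spec : Claim_equal_missing_value_counts := by
  intro features _
  show missing_value_counts features = missing_value_counts_alt features
  rw [missing_value_counts_eq_foldl]
  have hn : ((features.flatten).foldl pvStepIns PySem.Dict.empty).keys.Nodup := by
    unfold pvStepIns
    exact PySem.Dict.nodup_keys_foldl_insert_key _ _ _ _ (by simp)
  rw [PySem.Dict.items_eq_map_keys _ hn 0]
  have hkeys : ((features.flatten).foldl pvStepIns PySem.Dict.empty).keys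
      = PySem.Set.ofList ((features.flatten).map Prod.fst) := by
    unfold pvStepIns
    rw [PySem.Dict.keys_foldl_insert_key]
    simp [PySem.Dict.keys_empty, PySem.Set.update_nil_left]
  rw [hkeys]
  unfold missing_value_counts_alt
  simp only [PySem.List.dedup_eq_ofList]
  apply List.map_congr_left
  intro k _
  have := pv_getD_foldl (features.flatten) PySem.Dict.empty k
  simp only [PySem.Dict.getD_empty] at this
  simp [this, pvCnt]
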